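-- pv_equiv track=rewrite | github.com/QYsaltyfish/Modeling-and-Optimization-Group | Code/model_apply/solver.py | find_station
-- ===== SOURCE A (Python) =====
-- def find_station(route_stops):
--     """
--     Parameters
--     ----------
--     route_stops: dict
--     Dictionary containing the stop types for a specific route.
--
--     Data format:
--     {
--         "<stop-id>": {
--             "type": "<stop-type>"
--         },
--         "..."
--     }
--
--     Returns
--     -------
--     station_info: tuple
--         A tuple containing two elements:
--         - station_idx (int): The index of the station.
--         - station_id (str): The stop ID of the station.
--     """
--     station_idx = None
--     station_id = None
--
--     for i, (stop_id, stop_dict) in enumerate(route_stops.items()):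
--         if stop_dict["type"] == "Station":
--             station_idx = i
--             station_id = stop_id
--
--     return station_idx, station_id
-- ===== SOURCE B (Python) =====
-- def find_station(route_stops):
--     items = list(route_stops.items())
--     for i in range(len(items) - 1, -1, -1):
--         if items[i][1]["type"] == "Station":
--             return i, items[i][0]
--     return None, None
-- ===== Notes on version B (the rewrite author's own statement) =====
-- stated objective: alternative
-- what changed: B scans the materialized items list backwards and returns at the first 'Station' found (early exit), instead of A's forward pass that overwrites a running last match.
-- outside the precondition, e.g. on find_station({'s1': {}}): A raises KeyError, B raises KeyError
import Mathlib
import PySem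

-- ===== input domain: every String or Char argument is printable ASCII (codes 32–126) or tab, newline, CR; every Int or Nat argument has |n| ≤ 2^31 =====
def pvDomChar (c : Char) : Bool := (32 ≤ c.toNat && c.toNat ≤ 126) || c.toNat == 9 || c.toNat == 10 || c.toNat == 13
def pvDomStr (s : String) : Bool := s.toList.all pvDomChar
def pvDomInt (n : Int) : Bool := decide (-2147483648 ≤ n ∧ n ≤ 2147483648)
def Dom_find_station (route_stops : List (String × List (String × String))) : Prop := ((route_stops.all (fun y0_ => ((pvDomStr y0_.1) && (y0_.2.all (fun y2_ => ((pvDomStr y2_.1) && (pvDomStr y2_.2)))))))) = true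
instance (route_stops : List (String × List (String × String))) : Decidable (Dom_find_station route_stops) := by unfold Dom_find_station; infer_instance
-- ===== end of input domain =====

-- B replaces A's forward scan with running last-match by a backward scan returning at the
-- first 'Station' (early exit); same return value, similar cost.

-- ===== PORT A =====
-- forward pass over enumerate(items), overwriting (station_idx, station_id) on every match;
-- stop_dict["type"] ported as first-match lookup with default "" (KeyError cases excluded by Pre_)
def find_station (route_stops : List (String × List (String × String))) : Option Int × Option String :=
  (PySem.List.enumerate route_stops 0).foldl
    (fun acc p => if ((p.2.2.lookup "type").getD "") == "Station" then (some p.1, some p.2.1) else acc)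
    (none, none)

-- ===== PORT B =====
-- backward scan: i counts down from len-1; first match returns immediately
def fsGoB : List (String × List (String × String)) → Int → Option Int × Option String
  | [], _ => (none, none)
  | (sid, d) :: rest, i =>
      if ((d.lookup "type").getD "") == "Station" then (some i, some sid)
      else fsGoB rest (i - 1)

def find_station_alt (route_stops : List (String × List (String × String))) : Option Int × Option String :=
  fsGoB route_stops.reverse ((route_stops.length : Int) - 1)

-- ===== PRECONDITION & SPEC =====
-- Pre_ excludes inputs where some stop dict has no "type" key: there Python A (and B) raise KeyError.
def Pre_find_station (route_stops : List (String × List (String × String))) : Prop :=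
  (route_stops.all (fun p => (p.2.lookup "type").isSome)) = true
instance (route_stops : List (String × List (String × String))) : Decidable (Pre_find_station route_stops) := by unfold Pre_find_station; infer_instance

def pvWitness_find_station : (List (String × List (String × String))) :=
  [("s1", [("type", "Drop")]), ("s2", [("type", "Station")])]

def Spec_find_station (route_stops : List (String × List (String × String))) (out : Option Int × Option String) : Prop := out = find_station_alt route_stops
instance (route_stops : List (String × List (String × String))) (out : Option Int × Option String) : Decidable (Spec_find_station route_stops out) := by unfold Spec_find_station; infer_instance

-- ===== CLAIM (what is proved, stated in full; the proofs are below) =====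
def Claim_equal_find_station : Prop := ∀ (route_stops : List (String × List (String × String))), Dom_find_station route_stops → Pre_find_station route_stops → Spec_find_station route_stops (find_station route_stops)

-- ===== LEMMAS AND PROOFS =====
theorem find_station_append (rs : List (String × List (String × String))) (x : String × List (String × String)) :
    find_station (rs ++ [x]) =
      if ((x.2.lookup "type").getD "") == "Station" then (some (rs.length : Int), some x.1)
      else find_station rs := by
  unfold find_station
  rw [PySem.List.enumerate_append, List.foldl_append]
  simp [PySem.List.enumerate]

theorem find_station_eq_alt (rs : List (String × List (String × String))) :
    find_station rs = find_station_alt rs := by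
  induction rs using List.reverseRecOn with
  | nil => rfl
  | append_singleton rs x ih =>
    rw [find_station_append]
    unfold find_station_alt
    rw [List.reverse_append]
    simp only [List.reverse_singleton, List.singleton_append, List.length_append,
      List.length_singleton]
    obtain ⟨sid, d⟩ := x
    unfold fsGoB
    split
    · simp
    · rw [ih]
      unfold find_station_alt
      norm_num

-- ===== VERDICT (by name: the statement is the Claim_ definition above) =====
theorem find_station_spec : Claim_equal_find_station := by
  intro rs _ _
  exact find_station_eq_alt rs
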